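-- pv_equiv track=rewrite | github.com/nekros1xx/ghascan | src/gha_vuln_scanner/scanner.py | find_job_for_line
-- ===== SOURCE A (Python) =====
-- def find_job_for_line(lines, vidx):
--     jobs_line = -1; jobs_indent = -1
--     for i, line in enumerate(lines):
--         s = line.strip()
--         if s == 'jobs:' or s.startswith('jobs:'):
--             jobs_line = i; jobs_indent = len(line) - len(line.lstrip()); break
--     if jobs_line < 0: return -1, ''
--     jki = jobs_indent + 2; cur_start = -1; cur_name = ''
--     for i in range(jobs_line + 1, len(lines)):
--         s = lines[i].strip(); ind = len(lines[i]) - len(lines[i].lstrip())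
--         if not s or s.startswith('#'): continue
--         if ind == jki and s.endswith(':') and not s.startswith('-'):
--             if i <= vidx: cur_start = i; cur_name = s.rstrip(':').strip()
--             elif cur_start >= 0: break
--         if ind < jki and i > jobs_line + 1 and s: break
--     return cur_start, cur_name
-- ===== SOURCE B (Python) =====
-- def find_job_for_line(lines, vidx):
--     jobs = next(((i, len(l) - len(l.lstrip())) for i, l in enumerate(lines)
--                  if l.strip().startswith('jobs:')), None)
--     if jobs is None:
--         return -1, ''
--     jl, ji = jobs
--     jki = ji + 2
--     # block end: first non-empty, non-comment line after jl+1 dedented below jki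
--     end = len(lines)
--     for i in range(jl + 2, len(lines)):
--         s = lines[i].strip()
--         if s and not s.startswith('#') and len(lines[i]) - len(lines[i].lstrip()) < jki:
--             end = i
--             break
--     headers = [(i, lines[i].strip().rstrip(':').strip())
--                for i in range(jl + 1, end)
--                if len(lines[i]) - len(lines[i].lstrip()) == jki
--                and not lines[i].strip().startswith('#')
--                and lines[i].strip().endswith(':')
--                and not lines[i].strip().startswith('-')]
--     last = [h for h in headers if h[0] <= vidx]
--     return last[-1] if last else (-1, '')
-- ===== Notes on version B (the rewrite author's own statement) =====
-- stated objective: simpler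
-- what changed: A's single stateful scan with current-header registers and two in-loop break conditions is decomposed into: find the jobs: line, compute the block end as the first dedented non-empty non-comment line after it, collect all job headers in the block, and return the last header at or before vidx.
import Mathlib
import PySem

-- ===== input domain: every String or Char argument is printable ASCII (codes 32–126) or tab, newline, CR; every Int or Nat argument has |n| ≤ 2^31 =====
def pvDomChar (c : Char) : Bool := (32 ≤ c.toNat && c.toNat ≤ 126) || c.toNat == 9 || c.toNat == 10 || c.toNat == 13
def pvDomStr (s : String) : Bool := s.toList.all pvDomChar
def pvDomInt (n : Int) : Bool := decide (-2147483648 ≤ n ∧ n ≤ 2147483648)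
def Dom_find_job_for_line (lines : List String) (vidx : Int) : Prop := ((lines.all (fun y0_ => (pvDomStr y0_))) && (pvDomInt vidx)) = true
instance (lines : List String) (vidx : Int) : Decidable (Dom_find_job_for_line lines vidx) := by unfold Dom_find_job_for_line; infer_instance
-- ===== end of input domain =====

-- B replaces A's stateful scan (current-header registers with two break conditions) by a
-- simpler decomposition: locate the jobs block end, list the job headers, take the last one ≤ vidx.

-- shared helpers (both Pythons contain these very expressions)
def pvIndent (line : String) : Int := PySem.Str.len line - PySem.Str.len (PySem.Str.lstrip line)
-- exact hand port of Python s.rstrip(':') (PySem has no chars-argument rstrip): drop trailing ':' chars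
def pvRstripColon (s : String) : String := String.mk ((s.toList.reverse.dropWhile (fun c => c == ':')).reverse)
def pvName (s : String) : String := PySem.Str.strip (pvRstripColon s)

-- ===== PORT A =====
-- first loop of A: find the 'jobs:' line (break = return first hit)
def pvFindJobsA : List (Int × String) → Option (Int × Int)
  | [] => none
  | (i, line) :: rest =>
      let s := PySem.Str.strip line
      if s == "jobs:" || PySem.Str.startswith s "jobs:" then some (i, pvIndent line)
      else pvFindJobsA rest

-- second loop of A over (i, lines[i]) for i in range(jobs_line+1, len(lines)), state (cur_start, cur_name)
def pvLoopA (jki jl vidx : Int) : List (Int × String) → Int → String → Int × String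
  | [], cs, cn => (cs, cn)
  | (i, line) :: rest, cs, cn =>
      let s := PySem.Str.strip line
      let ind := pvIndent line
      if s == "" || PySem.Str.startswith s "#" then pvLoopA jki jl vidx rest cs cn
      else if ind == jki && PySem.Str.endswith s ":" && !(PySem.Str.startswith s "-") then
        if i ≤ vidx then
          if ind < jki ∧ jl + 1 < i ∧ s ≠ "" then (i, pvName s)
          else pvLoopA jki jl vidx rest i (pvName s)
        else if 0 ≤ cs then (cs, cn)
        else if ind < jki ∧ jl + 1 < i ∧ s ≠ "" then (cs, cn)
        else pvLoopA jki jl vidx rest cs cn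
      else if ind < jki ∧ jl + 1 < i ∧ s ≠ "" then (cs, cn)
      else pvLoopA jki jl vidx rest cs cn

def find_job_for_line (lines : List String) (vidx : Int) : Int × String :=
  match pvFindJobsA (PySem.List.enumerate lines 0) with
  | none => (-1, "")
  | some (jl, ji) =>
      pvLoopA (ji + 2) jl vidx ((PySem.List.enumerate lines 0).drop (jl + 1).toNat) (-1) ""

-- ===== PORT B =====
def pvBrkB (jki : Int) (line : String) : Bool :=
  (PySem.Str.strip line != "") && !(PySem.Str.startswith (PySem.Str.strip line) "#") && (pvIndent line < jki)

def pvHdrB (jki : Int) (line : String) : Bool :=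
  (pvIndent line == jki) && !(PySem.Str.startswith (PySem.Str.strip line) "#")
    && PySem.Str.endswith (PySem.Str.strip line) ":" && !(PySem.Str.startswith (PySem.Str.strip line) "-")

def find_job_for_line_alt (lines : List String) (vidx : Int) : Int × String :=
  match (PySem.List.enumerate lines 0).find? (fun p => PySem.Str.startswith (PySem.Str.strip p.2) "jobs:") with
  | none => (-1, "")
  | some (jl, l) =>
      let jki := pvIndent l + 2
      let en := PySem.List.enumerate lines 0
      let endIdx : Int :=
        match (en.drop (jl + 2).toNat).find? (fun p => pvBrkB jki p.2) with
        | some p => p.1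
        | none => (lines.length : Int)
      let block := (en.drop (jl + 1).toNat).take (endIdx - (jl + 1)).toNat
      let headers := (block.filter (fun p => pvHdrB jki p.2)).map
        (fun p => (p.1, pvName (PySem.Str.strip p.2)))
      let last := headers.filter (fun h => h.1 ≤ vidx)
      match last.getLast? with
      | some h => h
      | none => (-1, "")

-- ===== PRECONDITION & SPEC =====
def Spec_find_job_for_line (lines : List String) (vidx : Int) (out : Int × String) : Prop := out = find_job_for_line_alt lines vidx
instance (lines : List String) (vidx : Int) (out : Int × String) : Decidable (Spec_find_job_for_line lines vidx out) := by unfold Spec_find_job_for_line; infer_instance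

-- ===== CLAIM (what is proved, stated in full; the proofs are below) =====
def Claim_equal_find_job_for_line : Prop := ∀ (lines : List String) (vidx : Int), Dom_find_job_for_line lines vidx → Spec_find_job_for_line lines vidx (find_job_for_line lines vidx)

-- ===== LEMMAS AND PROOFS =====

-- B's header pipeline over an already-truncated block
def pvPipe (jki vidx : Int) (block : List (Int × String)) : List (Int × String) :=
  ((block.filter (fun p => pvHdrB jki p.2)).map
    (fun p => (p.1, pvName (PySem.Str.strip p.2)))).filter (fun h => decide (h.1 ≤ vidx))

theorem pvJobs_or (s : String) :
    (s == "jobs:" || PySem.Str.startswith s "jobs:") = PySem.Str.startswith s "jobs:" := by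
  by_cases h : (s == "jobs:") = true
  · have hs : s = "jobs:" := by simpa using h
    subst hs; decide
  · simp at h
    simp [h]

theorem pvFindA_eq (t : List (Int × String)) :
    pvFindJobsA t
      = (t.find? (fun p => PySem.Str.startswith (PySem.Str.strip p.2) "jobs:")).map
          (fun p => (p.1, pvIndent p.2)) := by
  induction t with
  | nil => simp [pvFindJobsA]
  | cons p rest ih =>
    obtain ⟨i, line⟩ := p
    simp only [pvFindJobsA, pvJobs_or]
    by_cases h : PySem.Str.startswith (PySem.Str.strip line) "jobs:" = true
    · rw [List.find?_cons_of_pos (by simpa using h)]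
      simp at h
      simp [h]
    · rw [List.find?_cons_of_neg (by simpa using h)]
      simp at h
      simp [h, ih]

theorem pvDropEnum {α : Type} (xs : List α) : ∀ (k : Nat) (s : Int),
    (PySem.List.enumerate xs s).drop k = PySem.List.enumerate (xs.drop k) (s + k) := by
  induction xs with
  | nil => intro k s; simp [PySem.List.enumerate_nil]
  | cons x xs ih =>
    intro k s
    cases k with
    | zero => simp
    | succ k =>
      simp only [PySem.List.enumerate_cons, List.drop_succ_cons, ih k (s + 1)]
      congr 1
      push_cast; ring

theorem pvFstGe {xs : List String} {s : Int} {p : Int × String}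
    (hp : p ∈ PySem.List.enumerate xs s) : s ≤ p.1 := by
  rw [PySem.List.mem_enumerate_iff] at hp
  obtain ⟨k, hk, rfl⟩ := hp
  simp

theorem pvGetLastGetD {α : Type} (a d : α) (l : List α) :
    ((a :: l).getLast?).getD d = (l.getLast?).getD a := by
  cases l with
  | nil => rfl
  | cons b l =>
    rw [List.getLast?_cons_cons]
    cases h : (b :: l).getLast? with
    | none => simp at h
    | some x => rfl

theorem pvPipeNil (jki vidx : Int) (xs : List String) (k : Int) (hv : vidx < k) :
    pvPipe jki vidx ((PySem.List.enumerate xs k).takeWhile (fun p => !pvBrkB jki p.2)) = [] := by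
  rw [pvPipe, List.filter_eq_nil_iff]
  intro h hmem
  obtain ⟨p, hpf, rfl⟩ := List.mem_map.1 hmem
  have hptw := (List.mem_filter.1 hpf).1
  have hpe : p ∈ PySem.List.enumerate xs k :=
    (List.takeWhile_sublist _).mem hptw
  have := pvFstGe hpe
  simp only [decide_eq_true_eq]
  omega

-- the block end computed from the first break line equals a takeWhile truncation
theorem pvTakeFind (jki : Int) (xs : List String) : ∀ (k : Int),
    (PySem.List.enumerate xs k).take
        (((match (PySem.List.enumerate xs k).find? (fun p => pvBrkB jki p.2) with
            | some p => p.1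
            | none => (k + xs.length : Int)) - k).toNat)
      = (PySem.List.enumerate xs k).takeWhile (fun p => !pvBrkB jki p.2) := by
  induction xs with
  | nil => intro k; simp [PySem.List.enumerate_nil]
  | cons x xs ih =>
    intro k
    simp only [PySem.List.enumerate_cons]
    by_cases hb : pvBrkB jki x = true
    · rw [List.find?_cons_of_pos (by simpa using hb)]
      simp [hb]
    · simp only [Bool.not_eq_true] at hb
      rw [List.find?_cons_of_neg (by simp [hb]), List.takeWhile_cons_of_pos (by simp [hb])]
      have hk1 : (k + 1 : Int) ≤
          (match (PySem.List.enumerate xs (k + 1)).find? (fun p => pvBrkB jki p.2) with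
           | some p => p.1
           | none => (k + 1 + xs.length : Int)) := by
        cases hf : (PySem.List.enumerate xs (k + 1)).find? (fun p => pvBrkB jki p.2) with
        | none => simp
        | some p => simpa using pvFstGe (List.mem_of_find?_eq_some hf)
      have harith : ∀ e : Int, k + 1 ≤ e → (e - k).toNat = (e - (k + 1)).toNat + 1 := by
        intro e he; omega
      rw [show ((x :: xs).length : Int) = (xs.length : Int) + 1 by push_cast [List.length_cons]; ring]
      cases hf : (PySem.List.enumerate xs (k + 1)).find? (fun p => pvBrkB jki p.2) with
      | none =>
        rw [hf] at hk1
        rw [show (k + ((xs.length : Int) + 1) - k).toNat = ((k + 1 + xs.length - (k+1)).toNat) + 1 by omega]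
        rw [List.take_succ_cons]
        have := ih (k + 1)
        rw [hf] at this
        rw [this]
      | some p =>
        rw [hf] at hk1
        rw [harith p.1 hk1, List.take_succ_cons]
        have := ih (k + 1)
        rw [hf] at this
        rw [this]

-- the state loop of A equals B's pipeline over the takeWhile-truncated block
theorem pvPipe_cons_not_hdr {jki vidx i : Int} {line : String} {t : List (Int × String)}
    (h : pvHdrB jki line = false) :
    pvPipe jki vidx ((i, line) :: t) = pvPipe jki vidx t := by
  simp [pvPipe, h]

theorem pvPipe_cons_hdr_le {jki vidx i : Int} {line : String} {t : List (Int × String)}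
    (h : pvHdrB jki line = true) (hv : i ≤ vidx) :
    pvPipe jki vidx ((i, line) :: t)
      = (i, pvName (PySem.Str.strip line)) :: pvPipe jki vidx t := by
  simp [pvPipe, h, hv]

theorem pvPipe_cons_hdr_gt {jki vidx i : Int} {line : String} {t : List (Int × String)}
    (h : pvHdrB jki line = true) (hv : ¬ i ≤ vidx) :
    pvPipe jki vidx ((i, line) :: t) = pvPipe jki vidx t := by
  simp [pvPipe, h, hv]

theorem pvHdrB_eq_of_not_comment {jki : Int} {x : String}
    (h : PySem.Chars.startswith (PySem.Chars.strip x.toList) ['#'] = false) :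
    pvHdrB jki x = (pvIndent x == jki && PySem.Str.endswith (PySem.Str.strip x) ":"
      && !(PySem.Str.startswith (PySem.Str.strip x) "-")) := by
  simp [pvHdrB, h, Bool.and_assoc]

-- one-step unfoldings of pvLoopA (rest kept a variable so the rewrites stay cheap)
theorem pvLoopA_skip {jki jl vidx i cs : Int} {line cn : String} {rest : List (Int × String)}
    (h : (PySem.Str.strip line == "" || PySem.Str.startswith (PySem.Str.strip line) "#") = true) :
    pvLoopA jki jl vidx ((i, line) :: rest) cs cn = pvLoopA jki jl vidx rest cs cn := by
  simp only [pvLoopA]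
  rw [if_pos h]

theorem pvLoopA_break {jki jl vidx i cs : Int} {line cn : String} {rest : List (Int × String)}
    (h : ¬ ((PySem.Str.strip line == "" || PySem.Str.startswith (PySem.Str.strip line) "#") = true))
    (h2 : ¬ ((pvIndent line == jki && PySem.Str.endswith (PySem.Str.strip line) ":"
      && !(PySem.Str.startswith (PySem.Str.strip line) "-")) = true))
    (h3 : pvIndent line < jki ∧ jl + 1 < i ∧ PySem.Str.strip line ≠ "") :
    pvLoopA jki jl vidx ((i, line) :: rest) cs cn = (cs, cn) := by
  simp only [pvLoopA]
  rw [if_neg h, if_neg h2, if_pos h3]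

theorem pvLoopA_other {jki jl vidx i cs : Int} {line cn : String} {rest : List (Int × String)}
    (h : ¬ ((PySem.Str.strip line == "" || PySem.Str.startswith (PySem.Str.strip line) "#") = true))
    (h2 : ¬ ((pvIndent line == jki && PySem.Str.endswith (PySem.Str.strip line) ":"
      && !(PySem.Str.startswith (PySem.Str.strip line) "-")) = true))
    (h3 : ¬ (pvIndent line < jki ∧ jl + 1 < i ∧ PySem.Str.strip line ≠ "")) :
    pvLoopA jki jl vidx ((i, line) :: rest) cs cn = pvLoopA jki jl vidx rest cs cn := by
  simp only [pvLoopA]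
  rw [if_neg h, if_neg h2, if_neg h3]

theorem pvLoopA_hdr_le {jki jl vidx i cs : Int} {line cn : String} {rest : List (Int × String)}
    (h : ¬ ((PySem.Str.strip line == "" || PySem.Str.startswith (PySem.Str.strip line) "#") = true))
    (h2 : (pvIndent line == jki && PySem.Str.endswith (PySem.Str.strip line) ":"
      && !(PySem.Str.startswith (PySem.Str.strip line) "-")) = true)
    (h3 : i ≤ vidx)
    (h4 : ¬ (pvIndent line < jki ∧ jl + 1 < i ∧ PySem.Str.strip line ≠ "")) :
    pvLoopA jki jl vidx ((i, line) :: rest) cs cn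
      = pvLoopA jki jl vidx rest i (pvName (PySem.Str.strip line)) := by
  simp only [pvLoopA]
  rw [if_neg h, if_pos h2, if_pos h3, if_neg h4]

theorem pvLoopA_hdr_gt_cs {jki jl vidx i cs : Int} {line cn : String} {rest : List (Int × String)}
    (h : ¬ ((PySem.Str.strip line == "" || PySem.Str.startswith (PySem.Str.strip line) "#") = true))
    (h2 : (pvIndent line == jki && PySem.Str.endswith (PySem.Str.strip line) ":"
      && !(PySem.Str.startswith (PySem.Str.strip line) "-")) = true)
    (h3 : ¬ i ≤ vidx) (h4 : 0 ≤ cs) :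
    pvLoopA jki jl vidx ((i, line) :: rest) cs cn = (cs, cn) := by
  simp only [pvLoopA]
  rw [if_neg h, if_pos h2, if_neg h3, if_pos h4]

theorem pvLoopA_hdr_gt_nocs {jki jl vidx i cs : Int} {line cn : String} {rest : List (Int × String)}
    (h : ¬ ((PySem.Str.strip line == "" || PySem.Str.startswith (PySem.Str.strip line) "#") = true))
    (h2 : (pvIndent line == jki && PySem.Str.endswith (PySem.Str.strip line) ":"
      && !(PySem.Str.startswith (PySem.Str.strip line) "-")) = true)
    (h3 : ¬ i ≤ vidx) (h4 : ¬ 0 ≤ cs)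
    (h5 : ¬ (pvIndent line < jki ∧ jl + 1 < i ∧ PySem.Str.strip line ≠ "")) :
    pvLoopA jki jl vidx ((i, line) :: rest) cs cn = pvLoopA jki jl vidx rest cs cn := by
  simp only [pvLoopA]
  rw [if_neg h, if_pos h2, if_neg h3, if_neg h4, if_neg h5]

set_option maxHeartbeats 1000000 in
theorem pvLoopA_eq (jki jl vidx : Int) : ∀ (xs : List String) (k cs : Int) (cn : String),
    jl + 1 < k →
    pvLoopA jki jl vidx (PySem.List.enumerate xs k) cs cn
      = (pvPipe jki vidx ((PySem.List.enumerate xs k).takeWhile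
          (fun p => !pvBrkB jki p.2))).getLast?.getD (cs, cn) := by
  intro xs
  induction xs with
  | nil => intro k cs cn _; simp [pvLoopA, pvPipe, PySem.List.enumerate_nil]
  | cons x xs ih =>
    intro k cs cn hk
    rw [PySem.List.enumerate_cons]
    by_cases hskip : (PySem.Str.strip x == "" || PySem.Str.startswith (PySem.Str.strip x) "#") = true
    · -- A skips the line; B keeps it in the block but it is neither break nor header
      have hskip' : (PySem.Str.strip x == "") = true ∨
          PySem.Str.startswith (PySem.Str.strip x) "#" = true := by
        rw [Bool.or_eq_true] at hskip; exact hskip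
      have hbrk : pvBrkB jki x = false := by
        rcases hskip' with h | h
        · have hs : PySem.Str.strip x = "" := by simpa using h
          simp [pvBrkB, hs]
        · simp at h
          simp [pvBrkB, h]
      have hhdr : pvHdrB jki x = false := by
        rcases hskip' with h | h
        · have hs : PySem.Str.strip x = "" := by simpa using h
          have he : PySem.Chars.endswith ([] : List Char) [':'] = false := by decide
          simp [pvHdrB, hs, he]
        · simp at h
          simp [pvHdrB, h]
      rw [pvLoopA_skip hskip, List.takeWhile_cons_of_pos (by simp [hbrk]),
        pvPipe_cons_not_hdr hhdr]
      exact ih (k + 1) cs cn (by omega)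
    · have hs2 := hskip
      simp only [Bool.or_eq_true, not_or, Bool.not_eq_true, beq_eq_false_iff_ne, ne_eq,
        PySem.Str.startswith_eq, PySem.Str.toList_strip, (show "#".toList = ['#'] from rfl)] at hs2
      by_cases hlt : pvIndent x < jki
      · -- dedent break for both
        have hhdrA : ¬ ((pvIndent x == jki && PySem.Str.endswith (PySem.Str.strip x) ":"
            && !(PySem.Str.startswith (PySem.Str.strip x) "-")) = true) := by
          simp only [Bool.and_eq_true, beq_iff_eq]
          rintro ⟨⟨h1, -⟩, -⟩
          omega
        have hbrk : pvBrkB jki x = true := by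
          simp [pvBrkB, hlt, hs2.1, hs2.2]
        rw [pvLoopA_break hskip hhdrA ⟨hlt, by omega, hs2.1⟩,
          List.takeWhile_cons_of_neg (by simp [hbrk])]
        simp [pvPipe]
      · have hbrk : pvBrkB jki x = false := by
          simp [pvBrkB, hlt]
        rw [List.takeWhile_cons_of_pos (by simp [hbrk])]
        by_cases hhdr : (pvIndent x == jki && PySem.Str.endswith (PySem.Str.strip x) ":"
            && !(PySem.Str.startswith (PySem.Str.strip x) "-")) = true
        · have hhdrB : pvHdrB jki x = true := by
            rw [pvHdrB_eq_of_not_comment hs2.2]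
            exact hhdr
          by_cases hv : k ≤ vidx
          · rw [pvLoopA_hdr_le hskip hhdr hv (fun h => hlt h.1),
              pvPipe_cons_hdr_le hhdrB hv, pvGetLastGetD]
            exact ih (k + 1) k (pvName (PySem.Str.strip x)) (by omega)
          · by_cases hcs : 0 ≤ cs
            · rw [pvLoopA_hdr_gt_cs hskip hhdr hv hcs, pvPipe_cons_hdr_gt hhdrB hv,
                pvPipeNil jki vidx xs (k + 1) (by omega)]
              rfl
            · rw [pvLoopA_hdr_gt_nocs hskip hhdr hv hcs (fun h => hlt h.1),
                pvPipe_cons_hdr_gt hhdrB hv]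
              exact ih (k + 1) cs cn (by omega)
        · have hhdrB : pvHdrB jki x = false := by
            rw [pvHdrB_eq_of_not_comment hs2.2]
            exact Bool.eq_false_iff.2 (fun hB => hhdr (by rw [hB]))
          rw [pvLoopA_other hskip hhdr (fun h => hlt h.1), pvPipe_cons_not_hdr hhdrB]
          exact ih (k + 1) cs cn (by omega)

-- one step of A at the exempt first line (i = jobs_line+1), then the master lemma
theorem pvStepEq (jki vidx : Int) (m : Nat) (x : String) (xs' : List String) (_l : String) :
    pvLoopA jki (m : Int) vidx
        (((m : Int) + 1, x) :: PySem.List.enumerate xs' ((m : Int) + 2)) (-1) ""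
      = (match ((((((m : Int) + 1, x) :: (PySem.List.enumerate xs' ((m : Int) + 2)).takeWhile
            (fun p => !pvBrkB jki p.2)).filter (fun p => pvHdrB jki p.2)).map
              (fun p => (p.1, pvName (PySem.Str.strip p.2)))).filter
                (fun h => decide (h.1 ≤ vidx))).getLast? with
         | some h => h
         | none => ((-1 : Int), "")) := by
  have hrhs : ∀ t : List (Int × String),
      (match (pvPipe jki vidx t).getLast? with
       | some h => h
       | none => ((-1 : Int), "")) = (pvPipe jki vidx t).getLast?.getD (-1, "") := by
    intro t
    cases (pvPipe jki vidx t).getLast? <;> rfl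
  show pvLoopA jki (m : Int) vidx
      (((m : Int) + 1, x) :: PySem.List.enumerate xs' ((m : Int) + 2)) (-1) ""
    = (match (pvPipe jki vidx (((m : Int) + 1, x) ::
        (PySem.List.enumerate xs' ((m : Int) + 2)).takeWhile
          (fun p => !pvBrkB jki p.2))).getLast? with
       | some h => h
       | none => ((-1 : Int), ""))
  rw [hrhs]
  have hnocs : ¬ (0 : Int) ≤ -1 := by norm_num
  have hnd : ¬ (pvIndent x < jki ∧ (m : Int) + 1 < (m : Int) + 1 ∧
      PySem.Str.strip x ≠ "") := fun h => by omega
  by_cases hskip : (PySem.Str.strip x == "" ||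
      PySem.Str.startswith (PySem.Str.strip x) "#") = true
  · have hs2 : (PySem.Str.strip x = "") ∨
        PySem.Chars.startswith (PySem.Chars.strip x.toList) ['#'] = true := by
      have := hskip
      simpa only [Bool.or_eq_true, beq_iff_eq, PySem.Str.startswith_eq,
        PySem.Str.toList_strip, (show "#".toList = ['#'] from rfl)] using this
    have hhdr : pvHdrB jki x = false := by
      rcases hs2 with h | h
      · have he : PySem.Chars.endswith ([] : List Char) [':'] = false := by decide
        simp [pvHdrB, h, he]
      · simp [pvHdrB, h]
    rw [pvLoopA_skip hskip, pvPipe_cons_not_hdr hhdr]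
    exact pvLoopA_eq jki (m : Int) vidx xs' ((m : Int) + 2) (-1) "" (by omega)
  · have hs2 := hskip
    simp only [Bool.or_eq_true, not_or, Bool.not_eq_true, beq_eq_false_iff_ne, ne_eq,
      PySem.Str.startswith_eq, PySem.Str.toList_strip,
      (show "#".toList = ['#'] from rfl)] at hs2
    by_cases hhdr : (pvIndent x == jki && PySem.Str.endswith (PySem.Str.strip x) ":"
        && !(PySem.Str.startswith (PySem.Str.strip x) "-")) = true
    · have hhdrB : pvHdrB jki x = true := by
        rw [pvHdrB_eq_of_not_comment hs2.2]
        exact hhdr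
      by_cases hv : (m : Int) + 1 ≤ vidx
      · rw [pvLoopA_hdr_le hskip hhdr hv hnd, pvPipe_cons_hdr_le hhdrB hv, pvGetLastGetD]
        exact pvLoopA_eq jki (m : Int) vidx xs' ((m : Int) + 2) ((m : Int) + 1)
          (pvName (PySem.Str.strip x)) (by omega)
      · rw [pvLoopA_hdr_gt_nocs hskip hhdr hv hnocs hnd, pvPipe_cons_hdr_gt hhdrB hv]
        exact pvLoopA_eq jki (m : Int) vidx xs' ((m : Int) + 2) (-1) "" (by omega)
    · have hhdrB : pvHdrB jki x = false := by
        rw [pvHdrB_eq_of_not_comment hs2.2]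
        exact Bool.eq_false_iff.2 (fun hB => hhdr (by rw [hB]))
      rw [pvLoopA_other hskip hhdr hnd, pvPipe_cons_not_hdr hhdrB]
      exact pvLoopA_eq jki (m : Int) vidx xs' ((m : Int) + 2) (-1) "" (by omega)

set_option maxHeartbeats 2000000 in
theorem find_job_for_line_spec : Claim_equal_find_job_for_line := by
  intro lines vidx _
  unfold Spec_find_job_for_line find_job_for_line find_job_for_line_alt
  rw [pvFindA_eq]
  cases hf : (PySem.List.enumerate lines 0).find?
      (fun p => PySem.Str.startswith (PySem.Str.strip p.2) "jobs:") with
  | none => simp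
  | some p =>
    obtain ⟨jl, l⟩ := p
    have hpmem := List.mem_of_find?_eq_some hf
    rw [PySem.List.mem_enumerate_iff] at hpmem
    obtain ⟨m, hm, hpe⟩ := hpmem
    have hjl : jl = (m : Int) := by
      have := congrArg Prod.fst hpe; simpa using this
    subst hjl
    simp only [Option.map_some]
    have ht1 : ((m : Int) + 1).toNat = m + 1 := by omega
    have ht2 : ((m : Int) + 2).toNat = m + 2 := by omega
    rw [ht1, ht2, pvDropEnum lines (m + 1) 0, pvDropEnum lines (m + 2) 0]
    have hc1 : ((0 : Int) + ((m + 1 : Nat) : Int)) = (m : Int) + 1 := by push_cast; ring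
    have hc2 : ((0 : Int) + ((m + 2 : Nat) : Int)) = (m : Int) + 2 := by push_cast; ring
    rw [hc1, hc2]
    cases hsplit : lines.drop (m + 1) with
    | nil =>
      have hsplit2 : lines.drop (m + 2) = [] := by
        have : lines.drop (m + 2) = (lines.drop (m + 1)).drop 1 := by
          rw [List.drop_drop]
        rw [this, hsplit]; rfl
      rw [hsplit2]
      simp [pvLoopA, PySem.List.enumerate_nil]
    | cons x xs' =>
      have hsplit2 : lines.drop (m + 2) = xs' := by
        have : lines.drop (m + 2) = (lines.drop (m + 1)).drop 1 := by
          rw [List.drop_drop]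
        rw [this, hsplit]; rfl
      rw [hsplit2]
      have hlen : lines.length = m + 2 + xs'.length := by
        have h1 := List.length_drop (l := lines) (i := m + 1)
        rw [hsplit] at h1
        simp at h1
        omega
      set jki := pvIndent l + 2 with hjki
      rw [PySem.List.enumerate_cons]
      have hc3 : ((m : Int) + 1 + 1) = (m : Int) + 2 := by ring
      rw [hc3]
      -- B's block is the head line plus the takeWhile truncation of the tail
      have hblock : ∀ endIdx : Int, (m : Int) + 2 ≤ endIdx →
          (((m : Int) + 1, x) :: PySem.List.enumerate xs' ((m : Int) + 2)).take
              ((endIdx - ((m : Int) + 1)).toNat)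
            = (((m : Int) + 1, x) :: (PySem.List.enumerate xs' ((m : Int) + 2)).take
                ((endIdx - ((m : Int) + 2)).toNat)) := by
        intro e he
        rw [show (e - ((m : Int) + 1)).toNat = (e - ((m : Int) + 2)).toNat + 1 by omega,
          List.take_succ_cons]
      have htw := pvTakeFind jki xs' ((m : Int) + 2)
      -- reduce B's endIdx match
      cases hfind : (PySem.List.enumerate xs' ((m : Int) + 2)).find?
          (fun p => pvBrkB jki p.2) with
      | some q =>
        rw [hfind] at htw
        have hq : (m : Int) + 2 ≤ q.1 := pvFstGe (List.mem_of_find?_eq_some hfind)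
        rw [hblock q.1 hq, htw]
        exact pvStepEq jki vidx m x xs' l
      | none =>
        rw [hfind] at htw
        have hlenZ : ((lines.length : Nat) : Int) = (m : Int) + 2 + (xs'.length : Int) := by
          rw [hlen]; push_cast; ring
        simp only [hlenZ]
        rw [hblock _ (by omega), htw]
        exact pvStepEq jki vidx m x xs' l
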